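-- pv_equiv track=rewrite | github.com/julianhooker/job-search-agent | src/filters/detail_filter.py | combine_decisions
-- ===== SOURCE A (Python) =====
-- def combine_decisions(decisions):
--     final_status = "keep"
--     reasons = []
--
--     for status, status_reasons in decisions:
--         reasons.extend(status_reasons)
--
--         if status == "reject":
--             final_status = "reject"
--         elif status == "maybe" and final_status != "reject":
--             final_status = "maybe"
--
--     return final_status, reasons
-- ===== SOURCE B (Python) =====
-- def combine_decisions(decisions):
--     statuses = []
--     reasons = []
--     for status, status_reasons in decisions:
--         statuses.append(status)
--         reasons.extend(status_reasons)
--     if "reject" in statuses: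
--         final_status = "reject"
--     elif "maybe" in statuses:
--         final_status = "maybe"
--     else:
--         final_status = "keep"
--     return final_status, reasons
-- ===== Notes on version B (the rewrite author's own statement) =====
-- stated objective: simpler
-- what changed: Replaces the in-loop running-priority status update with a collect-then-decide decomposition: one pass gathers statuses and reasons, then final_status is chosen by membership priority (reject > maybe > keep).
import Mathlib
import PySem

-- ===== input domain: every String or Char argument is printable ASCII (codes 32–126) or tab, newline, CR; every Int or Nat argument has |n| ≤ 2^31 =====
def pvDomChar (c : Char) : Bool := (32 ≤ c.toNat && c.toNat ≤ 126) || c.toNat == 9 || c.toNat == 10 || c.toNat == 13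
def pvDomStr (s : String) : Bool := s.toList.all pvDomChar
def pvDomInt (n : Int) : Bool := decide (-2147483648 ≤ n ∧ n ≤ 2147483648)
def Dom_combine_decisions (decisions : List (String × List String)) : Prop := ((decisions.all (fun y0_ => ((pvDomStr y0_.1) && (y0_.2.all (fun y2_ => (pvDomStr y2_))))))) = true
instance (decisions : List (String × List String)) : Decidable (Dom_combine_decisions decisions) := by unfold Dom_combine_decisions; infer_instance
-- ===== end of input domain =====

-- B replaces A's in-loop running-priority update with collect-then-decide (simpler decomposition, same O(n)).

-- ===== PORT A =====
-- A: single loop carrying (final_status, reasons), updating the status by priority inside the loop.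
def combine_decisions (decisions : List (String × List String)) : String × List String :=
  decisions.foldl
    (fun st d =>
      let reasons := st.2 ++ d.2
      let final_status :=
        if d.1 == "reject" then "reject"
        else if d.1 == "maybe" && st.1 != "reject" then "maybe"
        else st.1
      (final_status, reasons))
    ("keep", [])

-- ===== PORT B =====
-- B: one loop collects (statuses, reasons); afterwards the final status is picked by membership.
def combine_decisions_alt (decisions : List (String × List String)) : String × List String :=
  let acc := decisions.foldl (fun acc d => (acc.1 ++ [d.1], acc.2 ++ d.2)) (([] : List String), ([] : List String))
  let final_status :=
    if acc.1.contains "reject" then "reject"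
    else if acc.1.contains "maybe" then "maybe"
    else "keep"
  (final_status, acc.2)

-- ===== PRECONDITION & SPEC =====
def Spec_combine_decisions (decisions : List (String × List String)) (out : String × List String) : Prop := out = combine_decisions_alt decisions
instance (decisions : List (String × List String)) (out : String × List String) : Decidable (Spec_combine_decisions decisions out) := by unfold Spec_combine_decisions; infer_instance

-- ===== CLAIM (what is proved, stated in full; the proofs are below) =====
def Claim_equal_combine_decisions : Prop := ∀ (decisions : List (String × List String)), Dom_combine_decisions decisions → Spec_combine_decisions decisions (combine_decisions decisions)

-- ===== LEMMAS AND PROOFS =====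

-- what A's status becomes when folded over the remaining statuses, starting from st
def pvPick (st : String) (sts : List String) : String :=
  if sts.contains "reject" then "reject"
  else if sts.contains "maybe" && st != "reject" then "maybe"
  else st

theorem combine_decisions_fold (l : List (String × List String)) (st : String) (rs : List String) :
    l.foldl
      (fun st d =>
        let reasons := st.2 ++ d.2
        let final_status :=
          if d.1 == "reject" then "reject"
          else if d.1 == "maybe" && st.1 != "reject" then "maybe"
          else st.1
        (final_status, reasons))
      (st, rs)
    = (pvPick st (l.map Prod.fst), rs ++ l.flatMap Prod.snd) := by
  induction l generalizing st rs with
  | nil => simp [pvPick]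
  | cons d t ih =>
      simp only [List.foldl_cons, List.map_cons, List.flatMap_cons, ih, Prod.mk.injEq]
      constructor
      · simp only [pvPick, List.contains_cons]
        by_cases h1 : d.1 = "reject"
        · simp [h1]
        · have b1 : ("reject" == d.1) = false := by
            simp only [beq_eq_false_iff_ne]; exact fun h => h1 h.symm
          by_cases h2 : d.1 = "maybe"
          · by_cases h3 : st = "reject" <;>
              · simp only [h2, h3]
                split_ifs <;> simp_all
          · have b2 : ("maybe" == d.1) = false := by
              simp only [beq_eq_false_iff_ne]; exact fun h => h2 h.symm
            simp only [b1, b2, Bool.false_or]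
            split_ifs <;> simp_all
      · simp

theorem combine_decisions_alt_fold (l : List (String × List String)) (sts rs : List String) :
    l.foldl (fun acc d => (acc.1 ++ [d.1], acc.2 ++ d.2)) (sts, rs)
    = (sts ++ l.map Prod.fst, rs ++ l.flatMap Prod.snd) := by
  induction l generalizing sts rs with
  | nil => simp
  | cons d t ih => simp [ih]

-- ===== VERDICT (by name: the statement is the Claim_ definition above) =====
theorem combine_decisions_spec : Claim_equal_combine_decisions := by
  intro decisions _
  unfold Spec_combine_decisions combine_decisions combine_decisions_alt
  rw [combine_decisions_fold, combine_decisions_alt_fold]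
  simp only [pvPick]
  split_ifs <;> simp_all
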